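-- pv_equiv track=rewrite | github.com/sofianeElguendouz/xic_attrib | models/explainerModelBU.py | remove_bad_endings
-- ===== SOURCE A (Python) =====
-- BAD_ENDINGS = ['with','in','on','of','a','at','to','for','an','this','his','her','that','the', 'and']
--
-- def remove_bad_endings(sentences):
--     new_sentences = []
--     for sentence in sentences:
--         bad_sentence= False
--         words = sentence.split(' ')
--         if len(words) == 0:
--             bad_sentence = True
--         else:
--             while words[-1] in BAD_ENDINGS:
--                 words = words[:-1]
--                 if len(words) == 0:
--                     bad_sentence = True
--                     break
--         if bad_sentence:
--             new_sentences.append(sentence)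
--         else:
--             new_sentence = ' '.join(words)
--             new_sentences.append(new_sentence)
--     return new_sentences
-- ===== SOURCE B (Python) =====
-- BAD_ENDINGS = ['with','in','on','of','a','at','to','for','an','this','his','her','that','the', 'and']
-- _BAD = frozenset(BAD_ENDINGS)
--
-- def remove_bad_endings(sentences):
--     out = []
--     for sentence in sentences:
--         words = sentence.split(' ')
--         i = len(words)
--         while i > 0 and words[i - 1] in _BAD:
--             i -= 1
--         out.append(' '.join(words[:i]) if i > 0 else sentence)
--     return out
-- ===== Notes on version B (the rewrite author's own statement) =====
-- stated objective: alternative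
-- what changed: B replaces A's repeated list slicing (words = words[:-1] on every loop iteration, O(n^2) worst case per sentence) with a backward index pointer over the split words plus frozenset membership, slicing and joining once per sentence.
import Mathlib
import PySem

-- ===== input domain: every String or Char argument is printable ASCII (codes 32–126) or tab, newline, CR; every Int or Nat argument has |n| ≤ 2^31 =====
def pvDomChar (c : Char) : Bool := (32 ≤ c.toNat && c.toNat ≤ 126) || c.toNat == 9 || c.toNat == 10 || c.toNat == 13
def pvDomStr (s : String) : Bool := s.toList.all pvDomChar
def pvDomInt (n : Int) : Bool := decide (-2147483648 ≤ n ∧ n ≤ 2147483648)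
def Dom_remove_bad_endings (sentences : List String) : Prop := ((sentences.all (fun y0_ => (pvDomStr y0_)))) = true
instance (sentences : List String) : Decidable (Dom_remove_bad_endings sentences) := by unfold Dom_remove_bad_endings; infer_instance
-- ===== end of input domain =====

-- B trims trailing stopwords with a backward index pointer (one take + one join per
-- sentence) instead of A's repeated `words[:-1]` slicing inside the while loop (same measured cost).

def pvBadEndings : List String :=
  ["with","in","on","of","a","at","to","for","an","this","his","her","that","the","and"]

-- sentence.split(' '): sep " " is nonempty, so Str.split? always returns some; getD [] is never taken
def pvSplit (sentence : String) : List String :=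
  (PySem.Str.split? sentence " ").getD []

-- ===== PORT A =====
-- A's while loop: while words[-1] in BAD_ENDINGS: words = words[:-1]; none = bad_sentence set inside the loop
def pvAWhile (words : List String) : Option (List String) :=
  match PySem.List.pyGet? words (-1) with
  | some w =>
    if w ∈ pvBadEndings then
      if (PySem.List.slice words none (some (-1))).length = 0 then none
      else pvAWhile (PySem.List.slice words none (some (-1)))
    else some words
  | none => some words   -- unreachable under A's guard (words is nonempty at every loop entry)
termination_by words.length
decreasing_by
  simp only [PySem.List.slice_to_neg_one, List.length_dropLast] at *
  omega

def remove_bad_endings (sentences : List String) : List String :=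
  sentences.foldl (fun new_sentences sentence =>
    let words := pvSplit sentence
    let result := if words.length = 0 then none else pvAWhile words
    match result with
    | none => new_sentences ++ [sentence]                       -- bad_sentence: keep the original
    | some ws => new_sentences ++ [PySem.Str.join " " ws]) []

-- ===== PORT B =====
-- B's backward pointer: while i > 0 and words[i-1] in BAD: i -= 1
def pvBPtr (words : List String) : Nat → Nat
  | 0 => 0
  | i + 1 => if words.getD i "" ∈ pvBadEndings then pvBPtr words i else i + 1

def remove_bad_endings_alt (sentences : List String) : List String :=
  sentences.map (fun sentence =>
    let words := pvSplit sentence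
    let i := pvBPtr words words.length
    if i > 0 then PySem.Str.join " " (words.take i) else sentence)

-- ===== PRECONDITION & SPEC =====
def Spec_remove_bad_endings (sentences : List String) (out : List String) : Prop := out = remove_bad_endings_alt sentences
instance (sentences : List String) (out : List String) : Decidable (Spec_remove_bad_endings sentences out) := by unfold Spec_remove_bad_endings; infer_instance

-- ===== CLAIM (what is proved, stated in full; the proofs are below) =====
def Claim_equal_remove_bad_endings : Prop := ∀ (sentences : List String), Dom_remove_bad_endings sentences → Spec_remove_bad_endings sentences (remove_bad_endings sentences)

-- ===== LEMMAS AND PROOFS =====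

-- pvBPtr only inspects indices below its counter
theorem pvBPtr_congr (ws ws' : List String) (i : Nat)
    (h : ∀ j, j < i → ws.getD j "" = ws'.getD j "") : pvBPtr ws i = pvBPtr ws' i := by
  induction i with
  | zero => rfl
  | succ i ih =>
    simp only [pvBPtr, h i (Nat.lt_succ_self i)]
    split
    · exact ih (fun j hj => h j (Nat.lt_succ_of_lt hj))
    · rfl

theorem pvBPtr_le (ws : List String) (i : Nat) : pvBPtr ws i ≤ i := by
  induction i with
  | zero => simp [pvBPtr]
  | succ i ih =>
    simp only [pvBPtr]
    split
    · omega
    · omega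

theorem getD_append_last (xs : List String) (w : String) : (xs ++ [w]).getD xs.length "" = w := by
  simp [List.getD]

-- A's while loop computes exactly B's pointer: it stops with the first i words when
-- i = pvBPtr ws ws.length > 0, and signals bad_sentence (none) when that pointer is 0.
theorem pvAWhile_eq_pvBPtr (ws : List String) (hne : ws ≠ []) :
    pvAWhile ws = (if pvBPtr ws ws.length = 0 then none else some (ws.take (pvBPtr ws ws.length))) := by
  induction ws using List.reverseRecOn with
  | nil => exact absurd rfl hne
  | append_singleton xs w ih =>
    rw [pvAWhile.eq_def]
    simp only [PySem.List.pyGet?_neg_one_append_singleton]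
    have hlen : (xs ++ [w]).length = xs.length + 1 := by simp
    by_cases hw : w ∈ pvBadEndings
    · simp only [hw, if_pos]
      rw [PySem.List.slice_to_neg_one]
      have hdrop : (xs ++ [w]).dropLast = xs := by simp
      rw [hdrop]
      have hptr : pvBPtr (xs ++ [w]) ((xs ++ [w]).length) = pvBPtr xs xs.length := by
        rw [hlen]
        simp only [pvBPtr, getD_append_last, hw, if_pos]
        apply pvBPtr_congr
        intro j hj
        simp [List.getD, List.getElem?_append_left hj]
      rw [hptr]
      by_cases hx : xs = []
      · subst hx; simp [pvBPtr]
      · have hxl : xs.length ≠ 0 := by simpa [List.length_eq_zero_iff] using hx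
        rw [if_neg hxl, ih hx]
        by_cases h0 : pvBPtr xs xs.length = 0
        · simp [h0]
        · simp only [if_neg h0]
          congr 1
          rw [List.take_append_of_le_length (pvBPtr_le xs xs.length)]
    · simp only [hw, if_false]
      have hptr : pvBPtr (xs ++ [w]) ((xs ++ [w]).length) = xs.length + 1 := by
        rw [hlen]
        simp only [pvBPtr, getD_append_last, hw]
        simp
      rw [hptr]
      simp [List.take_of_length_le (by simp : (xs ++ [w]).length ≤ xs.length + 1)]

-- ===== VERDICT (by name: the statement is the Claim_ definition above) =====
-- A's per-sentence result, factored out so the foldl matches the append-singleton loop shape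
def pvAResult (s : String) : String :=
  match (if (pvSplit s).length = 0 then none else pvAWhile (pvSplit s)) with
  | none => s
  | some ws => PySem.Str.join " " ws

theorem remove_bad_endings_spec : Claim_equal_remove_bad_endings := by
  intro sentences _
  unfold Spec_remove_bad_endings remove_bad_endings remove_bad_endings_alt
  have hstep : (fun (new_sentences : List String) (sentence : String) =>
      let words := pvSplit sentence
      let result := if words.length = 0 then none else pvAWhile words
      match result with
      | none => new_sentences ++ [sentence]
      | some ws => new_sentences ++ [PySem.Str.join " " ws])
      = fun (new_sentences : List String) (sentence : String) => new_sentences ++ [pvAResult sentence] := by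
    funext ns s
    simp only [pvAResult]
    cases h : (if (pvSplit s).length = 0 then none else pvAWhile (pvSplit s)) with
    | none => simp
    | some ws => simp
  rw [hstep, PySem.List.foldl_append_singleton_eq_map]
  simp only [List.nil_append]
  apply List.map_congr_left
  intro s _
  simp only [pvAResult]
  by_cases hne : pvSplit s = []
  · simp [hne, pvBPtr]
  · have hlen : (pvSplit s).length ≠ 0 := by simpa [List.length_eq_zero_iff] using hne
    rw [if_neg hlen, pvAWhile_eq_pvBPtr _ hne]
    by_cases h0 : pvBPtr (pvSplit s) (pvSplit s).length = 0
    · simp [h0]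
    · simp [h0, Nat.pos_of_ne_zero h0]
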